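-- pv_equiv track=rewrite | github.com/Redx-Pharma/uichem_rx_os | app/app.py | preprocess_label
-- ===== SOURCE A (Python) =====
-- def preprocess_label(
--     label: str,
--     every_n_spaces: int = 3,
--     linebreak: str = "<br>",
-- ) -> str:
--     """
--     Function to preprocess the label for the plot
--     Args:
--         label: str: Label
--         every_n_spaces: int: Every n spaces
--     Returns:
--         LiteralString | str: Wrapped label
--     """
--     labs = label.replace("_", " ").split()
--     wrapped_lab = ""
--     for ith, ent in enumerate(labs):
--         if ith % every_n_spaces == 0 and ith != len(labs) - 1:
--             wrapped_lab += f"{ent}{linebreak}"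
--         elif ith == len(labs) - 1:
--             wrapped_lab += f"{ent}"
--         else:
--             wrapped_lab += f"{ent} "
--     return wrapped_lab.strip()
-- ===== SOURCE B (Python) =====
-- def preprocess_label(
--     label: str,
--     every_n_spaces: int = 3,
--     linebreak: str = "<br>",
-- ) -> str:
--     """Wrap a label: group words into lines, then join the lines with the linebreak."""
--     words = label.replace("_", " ").split()
--     lines = []
--     cur = []
--     for i, w in enumerate(words):
--         cur.append(w)
--         if i % every_n_spaces == 0:
--             lines.append(cur)
--             cur = []
--     if cur:
--         lines.append(cur)
--     return linebreak.join(" ".join(line) for line in lines).strip()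
-- ===== Notes on version B (the rewrite author's own statement) =====
-- stated objective: alternative
-- what changed: B first partitions the word list into a list of lines (closing the current line when i % every_n_spaces == 0) and only then renders the text with two joins and one strip, instead of A's single pass that concatenates word-by-word into a string choosing among three separators via a last-index test.
import Mathlib
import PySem

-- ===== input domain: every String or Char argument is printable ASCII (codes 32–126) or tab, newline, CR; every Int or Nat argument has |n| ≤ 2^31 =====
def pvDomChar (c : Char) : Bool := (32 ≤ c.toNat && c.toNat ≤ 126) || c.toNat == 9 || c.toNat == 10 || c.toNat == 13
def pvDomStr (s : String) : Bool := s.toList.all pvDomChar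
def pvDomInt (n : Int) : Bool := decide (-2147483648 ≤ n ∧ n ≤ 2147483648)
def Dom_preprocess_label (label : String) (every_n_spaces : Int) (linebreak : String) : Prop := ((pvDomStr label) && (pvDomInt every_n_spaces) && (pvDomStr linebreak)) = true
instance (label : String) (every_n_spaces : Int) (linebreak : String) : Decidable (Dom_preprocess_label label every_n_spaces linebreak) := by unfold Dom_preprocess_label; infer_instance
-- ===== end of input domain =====

-- B partitions the words into a list of lines first and renders the text with two joins afterwards;
-- A concatenates word-by-word picking one of three separators. Same value everywhere Python A returns.

-- ===== PORT A =====
-- loop body of A: if ith % n == 0 and ith != len(labs)-1: acc+ent+linebreak  elif ith == len(labs)-1: acc+ent  else: acc+ent+' '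
def pvStepA (n m : Int) (lb : List Char) (acc : List Char) (p : Int × List Char) : List Char :=
  if PySem.Int.mod p.1 m == 0 && p.1 != n - 1 then acc ++ p.2 ++ lb
  else if p.1 == n - 1 then acc ++ p.2
  else acc ++ p.2 ++ [' ']

def preprocess_label (label : String) (every_n_spaces : Int) (linebreak : String) : String :=
  let labs := PySem.Chars.split₀ (PySem.Chars.replace label.toList ['_'] [' '])
  let wrapped := (PySem.List.enumerate labs 0).foldl
      (pvStepA (labs.length : Int) every_n_spaces linebreak.toList) []
  String.ofList (PySem.Chars.strip wrapped)

-- ===== PORT B =====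
-- loop body of B: cur.append(w); if i % every_n_spaces == 0: lines.append(cur); cur = []
def pvStepB (m : Int) (st : List (List (List Char)) × List (List Char)) (p : Int × List Char) :
    List (List (List Char)) × List (List Char) :=
  let cur' := st.2 ++ [p.2]
  if PySem.Int.mod p.1 m == 0 then (st.1 ++ [cur'], []) else (st.1, cur')

def preprocess_label_alt (label : String) (every_n_spaces : Int) (linebreak : String) : String :=
  let words := PySem.Chars.split₀ (PySem.Chars.replace label.toList ['_'] [' '])
  let st := (PySem.List.enumerate words 0).foldl (pvStepB every_n_spaces) ([], [])
  let lines := if st.2 = [] then st.1 else st.1 ++ [st.2]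
  String.ofList (PySem.Chars.strip
    (PySem.Chars.join linebreak.toList (lines.map (PySem.Chars.join [' ']))))

-- ===== PRECONDITION & SPEC =====
-- Pre_ excludes exactly the inputs where Python A raises ZeroDivisionError: every_n_spaces = 0
-- while the label has at least one word (B raises there too).
def Pre_preprocess_label (label : String) (every_n_spaces : Int) (linebreak : String) : Prop :=
  every_n_spaces ≠ 0 ∨ PySem.Chars.split₀ (PySem.Chars.replace label.toList ['_'] [' ']) = []
instance (label : String) (every_n_spaces : Int) (linebreak : String) : Decidable (Pre_preprocess_label label every_n_spaces linebreak) := by unfold Pre_preprocess_label; infer_instance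
def pvWitness_preprocess_label : String × Int × String := ("one_two three four_five", 3, "<br>")

def Spec_preprocess_label (label : String) (every_n_spaces : Int) (linebreak : String) (out : String) : Prop := out = preprocess_label_alt label every_n_spaces linebreak
instance (label : String) (every_n_spaces : Int) (linebreak : String) (out : String) : Decidable (Spec_preprocess_label label every_n_spaces linebreak out) := by unfold Spec_preprocess_label; infer_instance

-- ===== CLAIM (what is proved, stated in full; the proofs are below) =====
def Claim_equal_preprocess_label : Prop := ∀ (label : String) (every_n_spaces : Int) (linebreak : String), Dom_preprocess_label label every_n_spaces linebreak → Pre_preprocess_label label every_n_spaces linebreak → Spec_preprocess_label label every_n_spaces linebreak (preprocess_label label every_n_spaces linebreak)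

-- ===== LEMMAS AND PROOFS =====

-- B's post-loop 'if cur: lines.append(cur)'
def pvFinish (st : List (List (List Char)) × List (List Char)) : List (List (List Char)) :=
  if st.2 = [] then st.1 else st.1 ++ [st.2]

-- rendering of B's intermediate state as the string A has accumulated so far
def pvRender (lb : List Char) (lines : List (List (List Char))) (cur : List (List Char)) : List Char :=
  (lines.map (fun l => PySem.Chars.join [' '] l ++ lb)).flatten ++ (cur.map (· ++ [' '])).flatten

lemma pv_join_snoc (sep : List Char) :
    ∀ (xs : List (List Char)) (x : List Char),
      PySem.Chars.join sep (xs ++ [x]) = (xs.map (· ++ sep)).flatten ++ x := by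
  intro xs
  induction xs with
  | nil => intro x; simp [PySem.Chars.join_singleton]
  | cons y ys ih =>
      intro x
      cases ys with
      | nil => simp [PySem.Chars.join_cons_cons, PySem.Chars.join_singleton]
      | cons z zs => simp_all [PySem.Chars.join_cons_cons]

-- final rendering: joining (lines ++ [c]) equals the prefix rendering followed by the last line
lemma pv_join_finish (lb : List Char) (lines : List (List (List Char))) (cur : List (List Char))
    (w : List Char) :
    PySem.Chars.join lb (lines.map (PySem.Chars.join [' ']) ++ [PySem.Chars.join [' '] (cur ++ [w])])
      = pvRender lb lines cur ++ w := by
  rw [pv_join_snoc, List.map_map, pv_join_snoc, pvRender]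
  simp [Function.comp_def]

-- loop invariant: A's accumulator is the rendering of B's state, and the two loops finish together
lemma pv_main (m : Int) (lb : List Char) (n : Int) :
    ∀ (ws : List (List Char)) (w : List Char) (i : Int)
      (lines : List (List (List Char))) (cur : List (List Char)),
      i + 1 + (ws.length : Int) = n →
      (PySem.List.enumerate (w :: ws) i).foldl (pvStepA n m lb) (pvRender lb lines cur)
        = PySem.Chars.join lb
            ((pvFinish ((PySem.List.enumerate (w :: ws) i).foldl (pvStepB m) (lines, cur))).map
              (PySem.Chars.join [' '])) := by
  intro ws
  induction ws with
  | nil =>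
      intro w i lines cur h
      have hi : i = n - 1 := by simp at h; omega
      subst hi
      simp only [PySem.List.enumerate_cons, PySem.List.enumerate_nil, List.foldl_cons,
        List.foldl_nil, pvStepA, pvStepB]
      by_cases hc : PySem.Int.mod (n - 1) m == 0 <;>
        simp [hc, pvFinish, pv_join_finish]
  | cons w' ws' ih =>
      intro w i lines cur h
      have hne : i ≠ n - 1 := by
        simp only [List.length_cons] at h
        push_cast at h
        omega
      rw [PySem.List.enumerate_cons]
      simp only [List.foldl_cons]
      by_cases hc : PySem.Int.mod i m == 0
      · have hA : pvStepA n m lb (pvRender lb lines cur) (i, w)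
            = pvRender lb (lines ++ [cur ++ [w]]) [] := by
          simp [pvStepA, hc, hne, pvRender, pv_join_snoc]
        have hB : pvStepB m (lines, cur) (i, w) = (lines ++ [cur ++ [w]], []) := by
          simp [pvStepB, hc]
        rw [hA, hB, ih w' (i + 1) (lines ++ [cur ++ [w]]) []
          (by simp only [List.length_cons] at h ⊢; push_cast at h ⊢; omega)]
      · have hA : pvStepA n m lb (pvRender lb lines cur) (i, w)
            = pvRender lb lines (cur ++ [w]) := by
          simp [pvStepA, hc, hne, pvRender]
        have hB : pvStepB m (lines, cur) (i, w) = (lines, cur ++ [w]) := by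
          simp [pvStepB, hc]
        rw [hA, hB, ih w' (i + 1) lines (cur ++ [w])
          (by simp only [List.length_cons] at h ⊢; push_cast at h ⊢; omega)]

-- ===== VERDICT (by name: the statement is the Claim_ definition above) =====
theorem preprocess_label_spec : Claim_equal_preprocess_label := by
  intro label m lb _ _
  unfold Spec_preprocess_label preprocess_label preprocess_label_alt
  cases hws : PySem.Chars.split₀ (PySem.Chars.replace label.toList ['_'] [' ']) with
  | nil => simp [PySem.List.enumerate_nil, PySem.Chars.join_nil]
  | cons w ws =>
      have h0 : pvRender lb.toList [] [] = [] := by simp [pvRender]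
      have := pv_main m lb.toList ((w :: ws).length : Int) ws w 0 [] []
        (by push_cast; simp; omega)
      rw [h0] at this
      simp only [this, pvFinish]
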